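-- pv_equiv track=rewrite | github.com/SouravDas25/NetworkingPaper | python/main/tree/MaximumEdgeRemoval.py | solve
-- ===== SOURCE A (Python) =====
-- def solve(n, edges):
--     graph = {i: [] for i in range(1, n + 1)}
--     for a, b in edges:
--         graph[a].append(b)
--     counts = {}
--
--     def dfs(node):
--         if node is None:
--             return 0
--         if node in counts:
--             return counts[node]
--         count = 0
--         for child in graph[node]:
--             count += dfs(child)
--         counts[node] = count + 1
--         return counts[node]
--
--     for i in range(1, n + 1):
--         dfs(i)
--     count = 0
--     for a, b in edges:
--         if counts[a] % 2 == 0 and counts[b] % 2 == 0: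
--             count += 1
--     return count
--
--     pass
-- ===== SOURCE B (Python) =====
-- def solve(n, edges):
--     # Recursion-free alternative: subtree sizes by synchronous fixpoint iteration
--     # (relax size[v] = 1 + sum of children's sizes in rounds until stable).
--     children = {i: [] for i in range(1, n + 1)}
--     for a, b in edges:
--         children[a].append(b)
--     size = {i: 0 for i in range(1, n + 1)}
--     for _ in range(len(edges) + 1):
--         new_size = {v: 1 + sum(size[c] for c in children[v]) for v in range(1, n + 1)}
--         if new_size == size:
--             break
--         size = new_size
--     return sum(1 for a, b in edges if size[a] % 2 == 0 and size[b] % 2 == 0)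
-- ===== Notes on version B (the rewrite author's own statement) =====
-- stated objective: alternative
-- what changed: Replaces the recursive memoized DFS with a recursion-free synchronous fixpoint iteration: subtree sizes are relaxed in rounds (size[v] = 1 + sum of children's sizes) until they stabilize (at most len(edges)+1 rounds), then the same edge parity pass counts the answer.
import Mathlib
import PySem

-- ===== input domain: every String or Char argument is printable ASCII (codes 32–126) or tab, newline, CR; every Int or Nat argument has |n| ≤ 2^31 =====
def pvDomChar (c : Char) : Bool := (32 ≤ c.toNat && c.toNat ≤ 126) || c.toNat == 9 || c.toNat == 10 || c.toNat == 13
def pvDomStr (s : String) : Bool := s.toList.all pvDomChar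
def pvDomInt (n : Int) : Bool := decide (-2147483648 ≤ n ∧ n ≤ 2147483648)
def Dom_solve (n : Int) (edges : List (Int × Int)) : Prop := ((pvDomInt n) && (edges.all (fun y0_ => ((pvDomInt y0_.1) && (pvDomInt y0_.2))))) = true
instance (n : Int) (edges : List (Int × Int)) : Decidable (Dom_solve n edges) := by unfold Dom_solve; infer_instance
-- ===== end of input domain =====

-- B replaces A's recursive memoized DFS by a recursion-free round-based fixpoint iteration of
-- the subtree-size recurrence (objective: alternative, no speed claim).

-- ===== PORT A =====
-- graph = {i: [] for i in range(1, n + 1)}; for a, b in edges: graph[a].append(b)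
-- (graph[a].append(b) ported as Dict.modify; Pre_solve guarantees a is a key, where Python would raise KeyError)
def buildGraphA (n : Int) (edges : List (Int × Int)) : PySem.Dict Int (List Int) :=
  edges.foldl (fun g e => g.modify e.1 [] (fun l => l ++ [e.2]))
    ((PySem.List.pyRange 1 (n + 1) 1).foldl (fun g i => g.insert i []) PySem.Dict.empty)

-- the memoized recursive dfs (the `node is None` test can never fire: nodes are ints);
-- the Nat fuel only makes the recursion total — it is never exhausted under Pre_solve
mutual
def dfsA (g : PySem.Dict Int (List Int)) : Nat → PySem.Dict Int Int → Int → PySem.Dict Int Int × Int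
  | 0, counts, _ => (counts, 0)
  | f + 1, counts, node =>
    match counts.get? node with
    | some c => (counts, c)
    | none =>
      let r := dfsListA g f counts 0 (g.getD node [])
      (r.1.insert node (r.2 + 1), r.2 + 1)
  termination_by f _ _ => (f, 0)

def dfsListA (g : PySem.Dict Int (List Int)) : Nat → PySem.Dict Int Int → Int → List Int → PySem.Dict Int Int × Int
  | _, counts, acc, [] => (counts, acc)
  | f, counts, acc, c :: cs =>
    let r := dfsA g f counts c
    dfsListA g f r.1 (acc + r.2) cs
  termination_by f _ _ l => (f, l.length + 1)
end

def solve (n : Int) (edges : List (Int × Int)) : Int :=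
  let graph := buildGraphA n edges
  let counts := (PySem.List.pyRange 1 (n + 1) 1).foldl
    (fun cs i => (dfsA graph (edges.length + 1) cs i).1) PySem.Dict.empty
  edges.foldl
    (fun c e =>
      if (PySem.Int.mod (counts.getD e.1 0) 2 == 0) && (PySem.Int.mod (counts.getD e.2 0) 2 == 0)
      then c + 1 else c) 0

-- ===== PORT B =====
-- children = {i: [] for i in range(1, n + 1)}; for a, b in edges: children[a].append(b)
def buildChildrenB (n : Int) (edges : List (Int × Int)) : PySem.Dict Int (List Int) :=
  edges.foldl (fun d e => d.modify e.1 [] (fun l => l ++ [e.2]))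
    ((PySem.List.pyRange 1 (n + 1) 1).foldl (fun d i => d.insert i []) PySem.Dict.empty)

-- for _ in range(len(edges)+1): new_size = {v: 1 + sum(size[c] for c in children[v]) for v in range(1, n+1)};
-- if new_size == size: break; size = new_size
-- (the dicts compared by Python's == share the same key insertion order 1..n, so structural equality is exact)
def loopB (n : Int) (children : PySem.Dict Int (List Int)) : Nat → PySem.Dict Int Int → PySem.Dict Int Int
  | 0, size => size
  | f + 1, size =>
    let new_size := (PySem.List.pyRange 1 (n + 1) 1).foldl
      (fun d v => d.insert v (1 + ((children.getD v []).map (fun c => size.getD c 0)).sum))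
      PySem.Dict.empty
    if new_size = size then size else loopB n children f new_size

def solve_alt (n : Int) (edges : List (Int × Int)) : Int :=
  let children := buildChildrenB n edges
  let size := loopB n children (edges.length + 1)
    ((PySem.List.pyRange 1 (n + 1) 1).foldl (fun d i => d.insert i (0 : Int)) PySem.Dict.empty)
  ((edges.filter (fun e =>
      (PySem.Int.mod (size.getD e.1 0) 2 == 0) && (PySem.Int.mod (size.getD e.2 0) 2 == 0))).length : Int)

-- ===== PRECONDITION & SPEC =====
-- one step of reachability along the directed edges
def pvStep (edges : List (Int × Int)) (s : Finset Int) : Finset Int :=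
  edges.foldr (fun e acc => if e.1 ∈ s then insert e.2 acc else acc) s

-- all nodes reachable from v (including v itself): edges.length steps reach the closure
def pvReach (edges : List (Int × Int)) (v : Int) : Finset Int :=
  (pvStep edges)^[edges.length] {v}

-- Pre_solve = exactly the inputs on which A returns: every endpoint is a key of graph (KeyError otherwise)
-- and the edge relation is acyclic (A's unguarded recursion diverges on a cycle)
def Pre_solve (n : Int) (edges : List (Int × Int)) : Prop :=
  (∀ e ∈ edges, (1 ≤ e.1 ∧ e.1 ≤ n) ∧ (1 ≤ e.2 ∧ e.2 ≤ n)) ∧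
  (∀ e ∈ edges, e.1 ∉ pvReach edges e.2)

instance (n : Int) (edges : List (Int × Int)) : Decidable (Pre_solve n edges) := by
  unfold Pre_solve; infer_instance

def pvWitness_solve : Int × (List (Int × Int)) := (3, [(1, 2), (1, 3)])

def Spec_solve (n : Int) (edges : List (Int × Int)) (out : Int) : Prop := out = solve_alt n edges
instance (n : Int) (edges : List (Int × Int)) (out : Int) : Decidable (Spec_solve n edges out) := by
  unfold Spec_solve; infer_instance

-- ===== CLAIM (what is proved, stated in full; the proofs are below) =====
def Claim_equal_solve : Prop := ∀ (n : Int) (edges : List (Int × Int)), Dom_solve n edges → Pre_solve n edges → Spec_solve n edges (solve n edges)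

-- ===== LEMMAS AND PROOFS =====

-- ---- reachability machinery (used to rank nodes of an acyclic edge relation) ----

theorem mem_pvStep (edges : List (Int × Int)) (s : Finset Int) (x : Int) :
    x ∈ pvStep edges s ↔ x ∈ s ∨ ∃ e ∈ edges, e.1 ∈ s ∧ e.2 = x := by
  induction edges with
  | nil => simp [pvStep]
  | cons e es ih =>
    simp only [pvStep, List.foldr_cons] at *
    by_cases h : e.1 ∈ s
    · simp only [h, if_true, Finset.mem_insert, ih, List.mem_cons]
      constructor
      · rintro (rfl | h1 | ⟨e', he', h2, h3⟩)
        · exact Or.inr ⟨e, Or.inl rfl, h, rfl⟩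
        · exact Or.inl h1
        · exact Or.inr ⟨e', Or.inr he', h2, h3⟩
      · rintro (h1 | ⟨e', (rfl | he'), h2, h3⟩)
        · exact Or.inr (Or.inl h1)
        · exact Or.inl h3.symm
        · exact Or.inr (Or.inr ⟨e', he', h2, h3⟩)
    · simp only [h, if_false, ih, List.mem_cons]
      constructor
      · rintro (h1 | ⟨e', he', h2, h3⟩)
        · exact Or.inl h1
        · exact Or.inr ⟨e', Or.inr he', h2, h3⟩
      · rintro (h1 | ⟨e', (rfl | he'), h2, h3⟩)
        · exact Or.inl h1
        · exact absurd h2 h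
        · exact Or.inr ⟨e', he', h2, h3⟩

theorem subset_pvStep (edges : List (Int × Int)) (s : Finset Int) : s ⊆ pvStep edges s :=
  fun x hx => (mem_pvStep edges s x).2 (Or.inl hx)

theorem pvStep_mono (edges : List (Int × Int)) {s t : Finset Int} (h : s ⊆ t) :
    pvStep edges s ⊆ pvStep edges t := by
  intro x hx
  rcases (mem_pvStep edges s x).1 hx with h1 | ⟨e, he, h1, h2⟩
  · exact (mem_pvStep edges t x).2 (Or.inl (h h1))
  · exact (mem_pvStep edges t x).2 (Or.inr ⟨e, he, h h1, h2⟩)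

def pvTargets (edges : List (Int × Int)) : Finset Int :=
  edges.foldr (fun e acc => insert e.2 acc) ∅

theorem mem_pvTargets (edges : List (Int × Int)) (x : Int) :
    x ∈ pvTargets edges ↔ ∃ e ∈ edges, e.2 = x := by
  induction edges with
  | nil => simp [pvTargets]
  | cons e es ih => simp only [pvTargets, List.foldr_cons] at *; simp [Finset.mem_insert, ih]; tauto

theorem card_pvTargets (edges : List (Int × Int)) : (pvTargets edges).card ≤ edges.length := by
  induction edges with
  | nil => simp [pvTargets]
  | cons e es ih =>
    simp only [pvTargets, List.foldr_cons, List.length_cons]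
    calc (insert e.2 (pvTargets es)).card ≤ (pvTargets es).card + 1 := Finset.card_insert_le _ _
    _ ≤ es.length + 1 := by omega

theorem pvStep_subset_union (edges : List (Int × Int)) (s : Finset Int) :
    pvStep edges s ⊆ s ∪ pvTargets edges := by
  intro x hx
  rcases (mem_pvStep edges s x).1 hx with h1 | ⟨e, he, _, h2⟩
  · exact Finset.mem_union_left _ h1
  · exact Finset.mem_union_right _ ((mem_pvTargets edges x).2 ⟨e, he, h2⟩)

theorem iter_pvStep_subset (edges : List (Int × Int)) (v : Int) :
    ∀ k, (pvStep edges)^[k] {v} ⊆ {v} ∪ pvTargets edges := by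
  intro k
  induction k with
  | zero => simp
  | succ k ih =>
    rw [Function.iterate_succ_apply']
    intro x hx
    rcases Finset.mem_union.1 (pvStep_subset_union edges _ hx) with h | h
    · exact ih h
    · exact Finset.mem_union_right _ h

theorem iter_pvStep_succ_subset (edges : List (Int × Int)) (v : Int) (k : Nat) :
    (pvStep edges)^[k] {v} ⊆ (pvStep edges)^[k + 1] {v} := by
  rw [Function.iterate_succ_apply']
  exact subset_pvStep edges _

theorem iter_pvStep_fixed (edges : List (Int × Int)) (v : Int) (k : Nat)
    (h : (pvStep edges)^[k] {v} = (pvStep edges)^[k + 1] {v}) :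
    ∀ j, k ≤ j → (pvStep edges)^[j] {v} = (pvStep edges)^[k] {v} := by
  intro j
  induction j with
  | zero => intro hj; have : k = 0 := by omega
            subst this; rfl
  | succ j ih =>
    intro hj
    rcases Nat.lt_or_ge k (j + 1) with hlt | hge
    · have hkj : k ≤ j := by omega
      rw [Function.iterate_succ_apply', ih hkj,
        show pvStep edges ((pvStep edges)^[k] {v}) = (pvStep edges)^[k + 1] {v} from
          (Function.iterate_succ_apply' _ _ _).symm, ← h]
    · have : k = j + 1 := by omega
      rw [this]

theorem card_iter_pvStep (edges : List (Int × Int)) (v : Int) (k : Nat)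
    (h : ∀ k' < k, (pvStep edges)^[k'] {v} ≠ (pvStep edges)^[k' + 1] {v}) :
    k + 1 ≤ ((pvStep edges)^[k] {v}).card := by
  induction k with
  | zero => simp
  | succ k ih =>
    have hk := ih (fun k' hk' => h k' (by omega))
    have hne := h k (by omega)
    have hss : (pvStep edges)^[k] {v} ⊂ (pvStep edges)^[k + 1] {v} :=
      ssubset_of_subset_of_ne (iter_pvStep_succ_subset edges v k) hne
    have := Finset.card_lt_card hss
    omega

theorem pvReach_fixed (edges : List (Int × Int)) (v : Int) :
    pvStep edges (pvReach edges v) = pvReach edges v := by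
  have key : (pvStep edges)^[edges.length + 1] {v} = (pvStep edges)^[edges.length] {v} := by
    by_cases h : ∃ k < edges.length, (pvStep edges)^[k] {v} = (pvStep edges)^[k + 1] {v}
    · obtain ⟨k, hk, hfix⟩ := h
      have h1 := iter_pvStep_fixed edges v k hfix edges.length (by omega)
      have h2 := iter_pvStep_fixed edges v k hfix (edges.length + 1) (by omega)
      rw [h1, h2]
    · push Not at h
      have hcard := card_iter_pvStep edges v edges.length h
      have hsub := iter_pvStep_subset edges v edges.length
      have hcard2 : ({v} ∪ pvTargets edges).card ≤ edges.length + 1 := by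
        have h3 := Finset.card_union_le ({v} : Finset Int) (pvTargets edges)
        have h4 := card_pvTargets edges
        simp only [Finset.card_singleton] at h3
        omega
      have heq : (pvStep edges)^[edges.length] {v} = {v} ∪ pvTargets edges :=
        Finset.eq_of_subset_of_card_le hsub (by omega)
      apply Finset.Subset.antisymm
      · intro x hx
        rw [heq]
        exact iter_pvStep_subset edges v _ hx
      · exact iter_pvStep_succ_subset edges v _
  show pvStep edges ((pvStep edges)^[edges.length] {v}) = (pvStep edges)^[edges.length] {v}
  rw [show pvStep edges ((pvStep edges)^[edges.length] {v})
        = (pvStep edges)^[edges.length + 1] {v} from (Function.iterate_succ_apply' _ _ _).symm]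
  exact key

theorem mem_pvReach_self (edges : List (Int × Int)) (v : Int) : v ∈ pvReach edges v := by
  have : ∀ k, v ∈ (pvStep edges)^[k] {v} := by
    intro k
    induction k with
    | zero => simp
    | succ k ih => exact iter_pvStep_succ_subset edges v k ih
  exact this edges.length

theorem pvReach_minimal (edges : List (Int × Int)) {x : Int} {s : Finset Int}
    (hx : x ∈ s) (hs : pvStep edges s = s) : pvReach edges x ⊆ s := by
  have : ∀ k, (pvStep edges)^[k] {x} ⊆ s := by
    intro k
    induction k with
    | zero => simpa using hx
    | succ k ih =>
      rw [Function.iterate_succ_apply']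
      intro y hy
      rw [← hs]
      exact pvStep_mono edges ih hy
  exact this edges.length

theorem mem_pvReach_of_edge (edges : List (Int × Int)) {e : Int × Int} (he : e ∈ edges) :
    e.2 ∈ pvReach edges e.1 := by
  rw [← pvReach_fixed edges e.1]
  exact (mem_pvStep edges _ e.2).2 (Or.inr ⟨e, he, mem_pvReach_self edges e.1, rfl⟩)

theorem pvReach_subset_of_edge (edges : List (Int × Int)) {e : Int × Int} (he : e ∈ edges) :
    pvReach edges e.2 ⊆ pvReach edges e.1 :=
  pvReach_minimal edges (mem_pvReach_of_edge edges he) (pvReach_fixed edges e.1)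

def pvRank (edges : List (Int × Int)) (v : Int) : Nat := (pvReach edges v).card

theorem pvRank_lt (edges : List (Int × Int))
    (hacyc : ∀ e ∈ edges, e.1 ∉ pvReach edges e.2) {e : Int × Int} (he : e ∈ edges) :
    pvRank edges e.2 < pvRank edges e.1 := by
  apply Finset.card_lt_card
  constructor
  · exact pvReach_subset_of_edge edges he
  · intro hsub
    exact hacyc e he (hsub (mem_pvReach_self edges e.1))

theorem pvRank_le (edges : List (Int × Int)) (v : Int) :
    pvRank edges v ≤ edges.length + 1 := by
  have h1 := Finset.card_le_card (iter_pvStep_subset edges v edges.length)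
  have h2 := Finset.card_union_le ({v} : Finset Int) (pvTargets edges)
  have h3 := card_pvTargets edges
  simp only [Finset.card_singleton] at h2
  exact le_trans h1 (by omega)

theorem pvRank_pos (edges : List (Int × Int)) (v : Int) : 1 ≤ pvRank edges v :=
  Finset.card_pos.2 ⟨v, mem_pvReach_self edges v⟩

-- ---- the subtree-size recurrence (the common specification of both programs) ----

def pvChildren (edges : List (Int × Int)) (v : Int) : List Int :=
  (edges.filter (fun e => e.1 == v)).map Prod.snd

def pvSz (edges : List (Int × Int)) : Nat → Int → Int
  | 0, _ => 0
  | f + 1, v => 1 + ((pvChildren edges v).map (fun c => pvSz edges f c)).sum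

theorem pvChildren_mem (edges : List (Int × Int)) {v c : Int} (hc : c ∈ pvChildren edges v) :
    (v, c) ∈ edges := by
  simp only [pvChildren, List.mem_map, List.mem_filter, beq_iff_eq] at hc
  obtain ⟨e, ⟨he, h1⟩, h2⟩ := hc
  have : e = (v, c) := by
    cases e; simp_all
  rwa [← this]

theorem pvSz_stable (edges : List (Int × Int))
    (hacyc : ∀ e ∈ edges, e.1 ∉ pvReach edges e.2) :
    ∀ (r : Nat) (v : Int), pvRank edges v ≤ r →
      ∀ (f g : Nat), pvRank edges v ≤ f → pvRank edges v ≤ g →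
        pvSz edges f v = pvSz edges g v := by
  intro r
  induction r with
  | zero => intro v hr; have := pvRank_pos edges v; omega
  | succ r ih =>
    intro v hr f g hf hg
    have hpos := pvRank_pos edges v
    obtain ⟨f', rfl⟩ : ∃ f', f = f' + 1 := ⟨f - 1, by omega⟩
    obtain ⟨g', rfl⟩ : ∃ g', g = g' + 1 := ⟨g - 1, by omega⟩
    simp only [pvSz]
    congr 1
    apply congrArg
    apply List.map_congr_left
    intro c hc
    have hedge := pvChildren_mem edges hc
    have hlt : pvRank edges c < pvRank edges v := pvRank_lt edges hacyc hedge
    exact ih c (by omega) f' g' (by omega) (by omega)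

def pvS (edges : List (Int × Int)) (v : Int) : Int := pvSz edges (edges.length + 1) v

theorem pvS_of_rank_le (edges : List (Int × Int))
    (hacyc : ∀ e ∈ edges, e.1 ∉ pvReach edges e.2) {v : Int} {f : Nat}
    (hf : pvRank edges v ≤ f) : pvSz edges f v = pvS edges v :=
  pvSz_stable edges hacyc (pvRank edges v) v le_rfl f (edges.length + 1)
    hf (pvRank_le edges v)

theorem pvS_eq (edges : List (Int × Int))
    (hacyc : ∀ e ∈ edges, e.1 ∉ pvReach edges e.2) (v : Int) :
    pvS edges v = 1 + ((pvChildren edges v).map (fun c => pvS edges c)).sum := by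
  have h1 : pvS edges v = pvSz edges (edges.length + 2) v :=
    (pvS_of_rank_le edges hacyc (by have := pvRank_le edges v; omega)).symm
  rw [h1]
  show 1 + ((pvChildren edges v).map (fun c => pvSz edges (edges.length + 1) c)).sum
      = 1 + ((pvChildren edges v).map (fun c => pvS edges c)).sum
  rfl

theorem pvSz_stab_range (n : Int) (edges : List (Int × Int))
    (hr : ∀ e ∈ edges, (1 ≤ e.1 ∧ e.1 ≤ n) ∧ (1 ≤ e.2 ∧ e.2 ≤ n)) (k : Nat)
    (h : ∀ v, 1 ≤ v ∧ v ≤ n → pvSz edges (k + 1) v = pvSz edges k v) :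
    ∀ j, k ≤ j → ∀ v, 1 ≤ v ∧ v ≤ n → pvSz edges j v = pvSz edges k v := by
  intro j
  induction j with
  | zero => intro hj v hv; have : k = 0 := by omega
            subst this; rfl
  | succ j ih =>
    intro hj v hv
    rcases Nat.lt_or_ge k (j + 1) with hlt | hge
    · have hkj : k ≤ j := by omega
      rw [← h v hv]
      simp only [pvSz]
      congr 1
      apply congrArg
      apply List.map_congr_left
      intro c hc
      have hedge := pvChildren_mem edges hc
      exact ih hkj c (hr _ hedge).2
    · have : k = j + 1 := by omega
      rw [this]

-- ---- dictionary lemmas shared by both ports ----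

theorem getD_foldl_insert_nil (v : Int) :
    ∀ (l : List Int) (d : PySem.Dict Int (List Int)), (∀ w, d.getD w [] = ([] : List Int)) →
      (l.foldl (fun d i => d.insert i []) d).getD v [] = [] := by
  intro l
  induction l with
  | nil => intro d hd; exact hd v
  | cons i l ih =>
    intro d hd
    simp only [List.foldl_cons]
    apply ih
    intro w
    rw [PySem.Dict.getD_insert]
    split <;> [rfl; exact hd w]

theorem getD_buildGraphA (n : Int) (edges : List (Int × Int)) (v : Int) :
    (buildGraphA n edges).getD v [] = pvChildren edges v := by
  unfold buildGraphA
  rw [PySem.Dict.getD_foldl_modify_append]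
  rw [getD_foldl_insert_nil v _ _ (fun w => PySem.Dict.getD_empty w [])]
  simp [pvChildren]

theorem getD_buildChildrenB (n : Int) (edges : List (Int × Int)) (v : Int) :
    (buildChildrenB n edges).getD v [] = pvChildren edges v := by
  unfold buildChildrenB
  rw [PySem.Dict.getD_foldl_modify_append]
  rw [getD_foldl_insert_nil v _ _ (fun w => PySem.Dict.getD_empty w [])]
  simp [pvChildren]

theorem get?_foldl_insert_fun (g : Int → Int) (x : Int) :
    ∀ (l : List Int) (d : PySem.Dict Int Int),
      (l.foldl (fun d v => d.insert v (g v)) d).get? x = if x ∈ l then some (g x) else d.get? x := by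
  intro l
  induction l with
  | nil => intro d; simp
  | cons i l ih =>
    intro d
    simp only [List.foldl_cons, ih, List.mem_cons]
    by_cases hx : x ∈ l
    · simp [hx]
    · by_cases hxi : x = i
      · subst hxi
        simp [hx, PySem.Dict.get?_insert_self]
      · rw [PySem.Dict.get?_insert]
        simp [hx, hxi]

-- ---- A-side: the memoized dfs computes pvS ----

def pvInvA (edges : List (Int × Int)) (counts : PySem.Dict Int Int) : Prop :=
  ∀ k c, counts.get? k = some c → c = pvS edges k

def pvExt (d d' : PySem.Dict Int Int) : Prop :=
  ∀ k c, d.get? k = some c → d'.get? k = some c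

theorem dfsListA_correct (g : PySem.Dict Int (List Int)) (edges : List (Int × Int)) (f : Nat) :
    ∀ (cs : List Int),
      (∀ c ∈ cs, ∀ counts, pvInvA edges counts →
        (dfsA g f counts c).2 = pvS edges c ∧ pvInvA edges (dfsA g f counts c).1 ∧
        pvExt counts (dfsA g f counts c).1) →
      ∀ counts acc, pvInvA edges counts →
        (dfsListA g f counts acc cs).2 = acc + ((cs.map (fun c => pvS edges c)).sum) ∧
        pvInvA edges (dfsListA g f counts acc cs).1 ∧
        pvExt counts (dfsListA g f counts acc cs).1 := by
  intro cs
  induction cs with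
  | nil =>
    intro _ counts acc hinv
    simp only [dfsListA]
    exact ⟨by simp, hinv, fun k c h => h⟩
  | cons c cs ih =>
    intro hGood counts acc hinv
    simp only [dfsListA]
    obtain ⟨h1, h2, h3⟩ := hGood c (List.mem_cons_self) counts hinv
    obtain ⟨h4, h5, h6⟩ := ih (fun c' hc' => hGood c' (List.mem_cons_of_mem _ hc'))
      (dfsA g f counts c).1 (acc + (dfsA g f counts c).2) h2
    refine ⟨?_, h5, fun k v h => h6 k v (h3 k v h)⟩
    rw [h4, h1]
    simp only [List.map_cons, List.sum_cons]
    ring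

theorem dfsA_correct (n : Int) (edges : List (Int × Int))
    (hacyc : ∀ e ∈ edges, e.1 ∉ pvReach edges e.2) :
    ∀ (r : Nat) (v : Int), pvRank edges v ≤ r →
      ∀ (f : Nat), pvRank edges v ≤ f → ∀ counts, pvInvA edges counts →
        (dfsA (buildGraphA n edges) f counts v).2 = pvS edges v ∧
        pvInvA edges (dfsA (buildGraphA n edges) f counts v).1 ∧
        pvExt counts (dfsA (buildGraphA n edges) f counts v).1 ∧
        (dfsA (buildGraphA n edges) f counts v).1.get? v = some (pvS edges v) := by
  intro r
  induction r with
  | zero => intro v hr; have := pvRank_pos edges v; omega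
  | succ r ih =>
    intro v hr f hf counts hinv
    have hpos := pvRank_pos edges v
    obtain ⟨f', rfl⟩ : ∃ f', f = f' + 1 := ⟨f - 1, by omega⟩
    match hm : counts.get? v with
    | some c =>
      have hc := hinv v c hm
      subst hc
      have hd : dfsA (buildGraphA n edges) (f' + 1) counts v = (counts, pvS edges v) := by
        simp only [dfsA, hm]
      rw [hd]
      exact ⟨rfl, hinv, fun k c h => h, hm⟩
    | none =>
      have hGood : ∀ c ∈ (buildGraphA n edges).getD v [], ∀ counts', pvInvA edges counts' →
          (dfsA (buildGraphA n edges) f' counts' c).2 = pvS edges c ∧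
          pvInvA edges (dfsA (buildGraphA n edges) f' counts' c).1 ∧
          pvExt counts' (dfsA (buildGraphA n edges) f' counts' c).1 := by
        intro c hc counts' hinv'
        rw [getD_buildGraphA] at hc
        have hlt : pvRank edges c < pvRank edges v := by
          simpa using pvRank_lt edges hacyc (pvChildren_mem edges hc)
        have h := ih c (by omega) f' (by omega) counts' hinv'
        exact ⟨h.1, h.2.1, h.2.2.1⟩
      obtain ⟨h1, h2, h3⟩ := dfsListA_correct (buildGraphA n edges) edges f'
        ((buildGraphA n edges).getD v []) hGood counts 0 hinv
      set res := dfsListA (buildGraphA n edges) f' counts 0 ((buildGraphA n edges).getD v [])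
        with hres
      have hd : dfsA (buildGraphA n edges) (f' + 1) counts v
          = (res.1.insert v (res.2 + 1), res.2 + 1) := by
        simp only [dfsA, hm]
        rw [hres]
      have hsum : res.2 + 1 = pvS edges v := by
        rw [h1, getD_buildGraphA, pvS_eq edges hacyc v]
        ring
      rw [hd]
      refine ⟨hsum, ?_, ?_, ?_⟩
      · intro k c h
        rw [PySem.Dict.get?_insert] at h
        split at h
        · rename_i hkv
          subst hkv
          rw [← hsum]; injection h with h; omega
        · exact h2 k c h
      · intro k c h
        have hkv : k ≠ v := by
          intro hkv; subst hkv; rw [hm] at h; simp at h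
        rw [PySem.Dict.get?_insert]
        simp only [hkv, if_false]
        exact h3 k c h
      · rw [PySem.Dict.get?_insert_self, hsum]

theorem loopA_correct (n : Int) (edges : List (Int × Int))
    (hacyc : ∀ e ∈ edges, e.1 ∉ pvReach edges e.2) :
    ∀ (L : List Int) (counts : PySem.Dict Int Int), pvInvA edges counts →
      pvInvA edges (L.foldl (fun cs i => (dfsA (buildGraphA n edges) (edges.length + 1) cs i).1) counts) ∧
      pvExt counts (L.foldl (fun cs i => (dfsA (buildGraphA n edges) (edges.length + 1) cs i).1) counts) ∧
      ∀ i ∈ L, (L.foldl (fun cs i => (dfsA (buildGraphA n edges) (edges.length + 1) cs i).1) counts).get? i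
        = some (pvS edges i) := by
  intro L
  induction L with
  | nil => intro counts hinv; exact ⟨hinv, fun k c h => h, by simp⟩
  | cons i L ih =>
    intro counts hinv
    simp only [List.foldl_cons]
    obtain ⟨h1, h2, h3, h4⟩ := dfsA_correct n edges hacyc (pvRank edges i) i le_rfl
      (edges.length + 1) (pvRank_le edges i) counts hinv
    obtain ⟨h5, h6, h7⟩ := ih (dfsA (buildGraphA n edges) (edges.length + 1) counts i).1 h2
    refine ⟨h5, fun k c h => h6 k c (h3 k c h), ?_⟩
    intro j hj
    rcases List.mem_cons.1 hj with rfl | hj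
    · exact h6 j _ h4
    · exact h7 j hj

theorem solveA_eq (n : Int) (edges : List (Int × Int))
    (hr : ∀ e ∈ edges, (1 ≤ e.1 ∧ e.1 ≤ n) ∧ (1 ≤ e.2 ∧ e.2 ≤ n))
    (hacyc : ∀ e ∈ edges, e.1 ∉ pvReach edges e.2) :
    solve n edges = (edges.countP (fun e =>
      (PySem.Int.mod (pvS edges e.1) 2 == 0) && (PySem.Int.mod (pvS edges e.2) 2 == 0)) : Int) := by
  obtain ⟨-, -, hfin⟩ := loopA_correct n edges hacyc (PySem.List.pyRange 1 (n + 1) 1)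
    PySem.Dict.empty (fun k c h => by rw [PySem.Dict.get?_empty] at h; simp at h)
  unfold solve
  simp only []
  set counts := (PySem.List.pyRange 1 (n + 1) 1).foldl
    (fun cs i => (dfsA (buildGraphA n edges) (edges.length + 1) cs i).1) PySem.Dict.empty with hc
  have hgd : ∀ w : Int, 1 ≤ w → w ≤ n → counts.getD w 0 = pvS edges w := by
    intro w h1 h2
    have := hfin w ((PySem.List.mem_pyRange_one).2 ⟨h1, by omega⟩)
    rw [PySem.Dict.getD_eq_get?_getD, this]
    rfl
  have hstep := PySem.List.foldl_congr_mem edges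
    (fun (c : Int) (e : Int × Int) =>
      if (PySem.Int.mod (counts.getD e.1 0) 2 == 0) && (PySem.Int.mod (counts.getD e.2 0) 2 == 0)
      then c + 1 else c)
    (fun (c : Int) (e : Int × Int) =>
      if (PySem.Int.mod (pvS edges e.1) 2 == 0) && (PySem.Int.mod (pvS edges e.2) 2 == 0)
      then c + 1 else c)
    0
    (by
      intro acc e he
      simp only [hgd e.1 (hr e he).1.1 (hr e he).1.2, hgd e.2 (hr e he).2.1 (hr e he).2.2])
  rw [hstep, PySem.List.foldl_if_add_one]
  simp

-- ---- B-side: the fixpoint iteration computes pvS ----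

def pvMkDict (n : Int) (g : Int → Int) : PySem.Dict Int Int :=
  (PySem.List.pyRange 1 (n + 1) 1).foldl (fun d v => d.insert v (g v)) PySem.Dict.empty

theorem get?_pvMkDict (n : Int) (g : Int → Int) (x : Int) :
    (pvMkDict n g).get? x = if 1 ≤ x ∧ x ≤ n then some (g x) else none := by
  unfold pvMkDict
  rw [get?_foldl_insert_fun]
  by_cases hx : 1 ≤ x ∧ x ≤ n
  · obtain ⟨h1, h2⟩ := hx
    have hlt : x < n + 1 := by omega
    simp [PySem.List.mem_pyRange_one, h1, h2, hlt]
  · have hnm : ¬ (x ∈ PySem.List.pyRange 1 (n + 1) 1) := by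
      rw [PySem.List.mem_pyRange_one]; omega
    simp [hnm, hx, PySem.Dict.get?_empty]

theorem pvMkDict_congr (n : Int) (g g' : Int → Int)
    (h : ∀ v, 1 ≤ v ∧ v ≤ n → g v = g' v) : pvMkDict n g = pvMkDict n g' := by
  unfold pvMkDict
  apply PySem.List.foldl_congr_mem
  intro acc v hv
  rw [h v (by have := (PySem.List.mem_pyRange_one).1 hv; omega)]

theorem roundB_eq (n : Int) (edges : List (Int × Int))
    (hr : ∀ e ∈ edges, (1 ≤ e.1 ∧ e.1 ≤ n) ∧ (1 ≤ e.2 ∧ e.2 ≤ n)) (k : Nat) :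
    (PySem.List.pyRange 1 (n + 1) 1).foldl
      (fun d v => d.insert v (1 + (((buildChildrenB n edges).getD v []).map
        (fun c => (pvMkDict n (fun w => pvSz edges k w)).getD c 0)).sum))
      PySem.Dict.empty
    = pvMkDict n (fun w => pvSz edges (k + 1) w) := by
  show pvMkDict n (fun v => 1 + (((buildChildrenB n edges).getD v []).map
        (fun c => (pvMkDict n (fun w => pvSz edges k w)).getD c 0)).sum)
    = pvMkDict n (fun w => pvSz edges (k + 1) w)
  apply pvMkDict_congr
  intro v hv
  rw [getD_buildChildrenB]
  have hmap : (pvChildren edges v).map (fun c => (pvMkDict n (fun w => pvSz edges k w)).getD c 0)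
      = (pvChildren edges v).map (fun c => pvSz edges k c) := by
    apply List.map_congr_left
    intro c hc
    have hcr := (hr _ (pvChildren_mem edges hc)).2
    rw [PySem.Dict.getD_eq_get?_getD, get?_pvMkDict]
    simp [hcr]
  rw [hmap]
  simp [pvSz]

theorem loopB_correct (n : Int) (edges : List (Int × Int))
    (hr : ∀ e ∈ edges, (1 ≤ e.1 ∧ e.1 ≤ n) ∧ (1 ≤ e.2 ∧ e.2 ≤ n)) :
    ∀ (f k : Nat), f + k = edges.length + 1 →
      ∀ v, 1 ≤ v ∧ v ≤ n →
        (loopB n (buildChildrenB n edges) f (pvMkDict n (fun w => pvSz edges k w))).get? v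
          = some (pvS edges v) := by
  intro f
  induction f with
  | zero =>
    intro k hk v hv
    simp only [loopB]
    rw [get?_pvMkDict]
    simp only [hv, and_self, if_true]
    have : k = edges.length + 1 := by omega
    subst this
    rfl
  | succ f ih =>
    intro k hk v hv
    simp only [loopB]
    rw [roundB_eq n edges hr k]
    by_cases heq : pvMkDict n (fun w => pvSz edges (k + 1) w) = pvMkDict n (fun w => pvSz edges k w)
    · simp only [heq, if_true]
      have hstab : ∀ w, 1 ≤ w ∧ w ≤ n → pvSz edges (k + 1) w = pvSz edges k w := by
        intro w hw
        have := congrArg (fun d => PySem.Dict.get? d w) heq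
        simp only [get?_pvMkDict, hw, and_self, if_true] at this
        exact Option.some.inj this
      rw [get?_pvMkDict]
      simp only [hv, and_self, if_true]
      have : pvS edges v = pvSz edges k v := by
        show pvSz edges (edges.length + 1) v = pvSz edges k v
        exact pvSz_stab_range n edges hr k hstab (edges.length + 1) (by omega) v hv
      rw [this]
    · simp only [heq, if_false]
      exact ih (k + 1) (by omega) v hv

theorem solveB_eq (n : Int) (edges : List (Int × Int))
    (hr : ∀ e ∈ edges, (1 ≤ e.1 ∧ e.1 ≤ n) ∧ (1 ≤ e.2 ∧ e.2 ≤ n)) :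
    solve_alt n edges = (edges.countP (fun e =>
      (PySem.Int.mod (pvS edges e.1) 2 == 0) && (PySem.Int.mod (pvS edges e.2) 2 == 0)) : Int) := by
  unfold solve_alt
  simp only []
  have h0 : (PySem.List.pyRange 1 (n + 1) 1).foldl
      (fun d i => d.insert i (0 : Int)) PySem.Dict.empty = pvMkDict n (fun w => pvSz edges 0 w) := by
    show pvMkDict n (fun _ => (0 : Int)) = pvMkDict n (fun w => pvSz edges 0 w)
    exact pvMkDict_congr n _ _ (fun v _ => by simp [pvSz])
  rw [h0]
  have hgd : ∀ w : Int, 1 ≤ w → w ≤ n →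
      (loopB n (buildChildrenB n edges) (edges.length + 1)
        (pvMkDict n (fun w => pvSz edges 0 w))).getD w 0 = pvS edges w := by
    intro w h1 h2
    rw [PySem.Dict.getD_eq_get?_getD,
      loopB_correct n edges hr (edges.length + 1) 0 (by omega) w ⟨h1, h2⟩]
    rfl
  rw [List.filter_congr (q := fun e =>
      (PySem.Int.mod (pvS edges e.1) 2 == 0) && (PySem.Int.mod (pvS edges e.2) 2 == 0))
    (by
      intro e he
      simp only [hgd e.1 (hr e he).1.1 (hr e he).1.2, hgd e.2 (hr e he).2.1 (hr e he).2.2])]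
  rw [← List.countP_eq_length_filter]

-- ===== VERDICT (by name: the statement is the Claim_ definition above) =====
theorem solve_spec : Claim_equal_solve := by
  unfold Claim_equal_solve
  intro n edges _ hpre
  unfold Spec_solve
  obtain ⟨hr, hacyc⟩ := hpre
  rw [solveA_eq n edges hr hacyc, solveB_eq n edges hr]
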